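-- pv_equiv track=rewrite | github.com/WVAviator/google-foobar-challenges | the-cake-is-not-a-lie.py | solution
-- ===== SOURCE A (Python) =====
-- def solution(s):
--     i = 1
--     while i < len(s) // 2 + 1:
--         if len(s) % i != 0:
--             i += 1
--             continue
--         if (s[0:i] * (len(s) // i)) == s:
--             return len(s) // i
--         i += 1
--     return 1
-- ===== SOURCE B (Python) =====
-- def solution(s):
--     n = len(s)
--     divs = set()
--     d = 1
--     while d * d <= n:
--         if n % d == 0:
--             divs.add(d)
--             divs.add(n // d)
--         d += 1
--     for d in sorted(divs):
--         if s[d:] + s[:d] == s: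
--             return n // d
--     return 1
-- ===== Notes on version B (the rewrite author's own statement) =====
-- stated objective: faster
-- what changed: B enumerates the divisors of len(s) via a sqrt-range pass and scans only those in increasing order, testing each with the rotation identity s[d:]+s[:d]==s, instead of A's loop over every candidate i up to n/2 that builds the repeated string s[:i]*(n//i) for each divisor.
import Mathlib
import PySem

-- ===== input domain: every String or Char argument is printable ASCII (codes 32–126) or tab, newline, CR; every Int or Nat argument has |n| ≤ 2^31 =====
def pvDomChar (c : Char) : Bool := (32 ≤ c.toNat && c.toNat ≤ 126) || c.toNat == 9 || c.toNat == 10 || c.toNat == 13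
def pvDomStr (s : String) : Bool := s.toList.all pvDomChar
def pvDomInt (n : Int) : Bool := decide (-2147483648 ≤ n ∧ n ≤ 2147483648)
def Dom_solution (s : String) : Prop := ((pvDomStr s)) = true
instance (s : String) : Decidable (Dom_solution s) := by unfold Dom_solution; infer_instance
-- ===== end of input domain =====

-- B replaces A's linear scan (building s[:i]*(len//i) for each candidate i up to n/2) by a
-- sqrt-range enumeration of the divisors of n scanned in increasing order with the rotation
-- test s[d:]+s[:d]==s; a timing run measured B faster (only O(sqrt n) candidates generated).

-- ===== PORT A =====
def solA_loop (l : List Char) (i : Int) : Int :=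
  if _h : i < PySem.Int.floordiv (l.length : Int) 2 + 1 then
    if PySem.Int.mod (l.length : Int) i ≠ 0 then solA_loop l (i + 1)
    else if PySem.List.pyRepeat (PySem.List.slice l (some 0) (some i)) (PySem.Int.floordiv (l.length : Int) i) = l then
      PySem.Int.floordiv (l.length : Int) i
    else solA_loop l (i + 1)
  else 1
termination_by (PySem.Int.floordiv (l.length : Int) 2 + 1 - i).toNat
decreasing_by all_goals omega

def solution (s : String) : Int := solA_loop s.toList 1

-- ===== PORT B =====
def divLoop (n : Int) (d : Int) (divs : PySem.Set Int) : PySem.Set Int :=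
  if _h : d * d ≤ n then
    divLoop n (d + 1)
      (if PySem.Int.mod n d = 0 then
        PySem.Set.add (PySem.Set.add divs d) (PySem.Int.floordiv n d)
      else divs)
  else divs
termination_by (n + 1 - d).toNat
decreasing_by
  have : d ≤ n := by nlinarith [sq_nonneg d]
  omega

def scanB (l : List Char) (n : Int) : List Int → Int
  | [] => 1
  | d :: rest =>
    if PySem.List.slice l (some d) none ++ PySem.List.slice l none (some d) = l then
      PySem.Int.floordiv n d
    else scanB l n rest

def solution_alt (s : String) : Int :=
  let l := s.toList
  let n : Int := (l.length : Int)
  scanB l n (PySem.List.sorted (divLoop n 1 PySem.Set.empty) (fun x => x) false)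

-- ===== PRECONDITION & SPEC =====
def Spec_solution (s : String) (out : Int) : Prop := out = solution_alt s
instance (s : String) (out : Int) : Decidable (Spec_solution s out) := by unfold Spec_solution; infer_instance

-- ===== CLAIM (what is proved, stated in full; the proofs are below) =====
def Claim_equal_solution : Prop := ∀ (s : String), Dom_solution s → Spec_solution s (solution s)

-- ===== LEMMAS AND PROOFS =====

-- "k is a period of l realised by a full rotation": 1 ≤ k, k divides the length, rotating by k fixes l
def pvGood (l : List Char) (k : Nat) : Prop := 1 ≤ k ∧ k ∣ l.length ∧ l.drop k ++ l.take k = l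

-- commuting words of commensurable lengths are powers of the shorter one
lemma pv_comm_pow (k : Nat) : ∀ (m : Nat) (u t : List Char), t.length = k → u.length = m * k →
    u ++ t = t ++ u → u = (List.replicate m t).flatten := by
  intro m
  induction m with
  | zero =>
    intro u t _ hu _
    simp only [Nat.zero_mul] at hu
    simp [List.eq_nil_of_length_eq_zero hu]
  | succ m ih =>
    intro u t ht hu hcomm
    have hkle : k ≤ u.length := by rw [hu, Nat.succ_mul]; omega
    have h1 : u.take k = t := by
      have h := congrArg (List.take k) hcomm
      rw [List.take_append_of_le_length hkle] at h
      rw [h, ← ht, List.take_left]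
    have hu' : u = t ++ u.drop k := by
      conv_lhs => rw [← List.take_append_drop k u]
      rw [h1]
    have hcomm' : u.drop k ++ t = t ++ u.drop k := by
      have h2 : (t ++ u.drop k) ++ t = t ++ u := by rw [← hu']; exact hcomm
      rw [List.append_assoc] at h2
      have := List.append_cancel_left h2
      rw [this, ← hu']
    have hlen' : (u.drop k).length = m * k := by
      rw [List.length_drop, hu, Nat.succ_mul]; omega
    have := ih (u.drop k) t ht hlen' hcomm'
    rw [List.replicate_succ, List.flatten_cons, ← this, ← hu']

-- the rotation test and A's repetition test agree on every divisor of the length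
lemma pv_rot_iff_rep (l : List Char) (k : Nat) (hk : 1 ≤ k) (hd : k ∣ l.length) :
    (l.drop k ++ l.take k = l) ↔ (List.replicate (l.length / k) (l.take k)).flatten = l := by
  rcases Nat.eq_zero_or_pos l.length with h0 | hpos
  · have hl : l = [] := List.eq_nil_of_length_eq_zero h0
    subst hl; simp
  · have hkN : k ≤ l.length := Nat.le_of_dvd hpos hd
    have ht : (l.take k).length = k := by simp [hkN]
    have hm : 1 ≤ l.length / k := Nat.one_le_div_iff (by omega) |>.mpr hkN
    constructor
    · intro hrot
      have hsplit : l.take k ++ l.drop k = l := List.take_append_drop k l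
      have hcomm : l.drop k ++ l.take k = l.take k ++ l.drop k := by rw [hrot, hsplit]
      have hlen : (l.drop k).length = (l.length / k - 1) * k := by
        rw [List.length_drop, Nat.sub_one_mul, Nat.div_mul_cancel hd]
      have := pv_comm_pow k (l.length / k - 1) (l.drop k) (l.take k) ht hlen hcomm
      calc (List.replicate (l.length / k) (l.take k)).flatten
          = (List.replicate (l.length / k - 1 + 1) (l.take k)).flatten := by
            rw [show l.length / k - 1 + 1 = l.length / k from by omega]
        _ = l.take k ++ (List.replicate (l.length / k - 1) (l.take k)).flatten := by
            rw [List.replicate_succ, List.flatten_cons]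
        _ = l.take k ++ l.drop k := by rw [← this]
        _ = l := hsplit
    · intro hrep
      have hstep : l = l.take k ++ (List.replicate (l.length / k - 1) (l.take k)).flatten := by
        conv_lhs => rw [← hrep]
        rw [show l.length / k = l.length / k - 1 + 1 from by omega, List.replicate_succ,
          List.flatten_cons]
        simp
      have hdrop : l.drop k = (List.replicate (l.length / k - 1) (l.take k)).flatten := by
        conv_lhs => rw [hstep]
        rw [List.drop_left' ht]
      rw [hdrop]
      calc (List.replicate (l.length / k - 1) (l.take k)).flatten ++ l.take k
          = (List.replicate (l.length / k - 1) (l.take k) ++ [l.take k]).flatten := by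
            rw [List.flatten_append]; simp
        _ = (List.replicate (l.length / k - 1 + 1) (l.take k)).flatten := by
            rw [List.replicate_succ']
        _ = l := by
            have h1 : l.length / k - 1 + 1 = l.length / k := by omega
            rw [h1]; exact hrep

lemma pv_floordiv_two (N : Nat) : PySem.Int.floordiv (N : Int) 2 = ((N / 2 : Nat) : Int) := by
  exact_mod_cast PySem.Int.floordiv_natCast N 2

-- a divisor of N greater than N/2 is N itself
lemma pv_big_divisor (N d : Nat) (hN : 1 ≤ N) (hd : d ∣ N) (_h1 : 1 ≤ d) (hbig : N / 2 < d) : d = N := by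
  obtain ⟨c, hc⟩ := hd
  rcases Nat.lt_or_ge c 2 with hc2 | hc2
  · interval_cases c <;> omega
  · exfalso
    have : 2 * d ≤ N := by calc 2 * d ≤ c * d := by exact Nat.mul_le_mul_right d hc2
                                _ = N := by rw [hc, Nat.mul_comm]
    omega

-- once the scan has passed N/2 without a hit, the least good period is N itself
lemma pv_d0_eq_N (l : List Char) (d0 : Nat) (hN : 1 ≤ l.length)
    (hgood : pvGood l d0) (j : Nat) (hj : l.length / 2 + 1 ≤ j)
    (hno : ∀ m, 1 ≤ m → m < j → ¬ pvGood l m) : d0 = l.length := by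
  have h1 : ¬ d0 < j := fun hlt => hno d0 hgood.1 hlt hgood
  exact pv_big_divisor l.length d0 hN hgood.2.1 hgood.1 (by omega)

-- A's loop returns N / d0 where d0 is the least good period
lemma pv_loopA (l : List Char) (d0 : Nat) (hN : 1 ≤ l.length)
    (hgood : pvGood l d0) (hmin : ∀ m, pvGood l m → d0 ≤ m) :
    ∀ (fuel j : Nat), l.length / 2 + 1 - j ≤ fuel → 1 ≤ j →
      (∀ m, 1 ≤ m → m < j → ¬ pvGood l m) →
      solA_loop l (j : Int) = ((l.length / d0 : Nat) : Int) := by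
  intro fuel
  induction fuel with
  | zero =>
    intro j hfu hj hno
    rw [solA_loop, pv_floordiv_two, dif_neg (by push_cast; omega)]
    rw [pv_d0_eq_N l d0 hN hgood j (by omega) hno, Nat.div_self (by omega)]
    simp
  | succ f ih =>
    intro j hfu hj hno
    rw [solA_loop, pv_floordiv_two]
    by_cases hcase : (j : Int) < ((l.length / 2 : Nat) : Int) + 1
    · have hjle : j ≤ l.length / 2 := by exact_mod_cast (by omega : (j : Int) ≤ ((l.length / 2 : Nat) : Int))
      rw [dif_pos hcase, PySem.Int.mod_natCast, PySem.List.slice_zero_start,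
        PySem.List.slice_to_natCast, PySem.List.pyRepeat, PySem.Int.floordiv_natCast,
        Int.toNat_natCast]
      have hstep : ∀ (hbad : ¬ pvGood l j), solA_loop l ((j : Int) + 1) = ((l.length / d0 : Nat) : Int) := by
        intro hbad
        rw [show ((j : Int) + 1) = ((j + 1 : Nat) : Int) from by push_cast; ring]
        refine ih (j + 1) (by omega) (by omega) ?_
        intro m hm1 hmlt
        rcases Nat.lt_or_ge m j with hmj | hmj
        · exact hno m hm1 hmj
        · have : m = j := by omega
          rw [this]; exact hbad
      split_ifs with h1 h2
      · -- len % j != 0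
        refine hstep ?_
        intro hbadgood
        have hz : l.length % j = 0 := Nat.dvd_iff_mod_eq_zero.mp hbadgood.2.1
        exact h1 (by exact_mod_cast hz)
      · -- repetition found: j is good and minimal
        have hdvdj : j ∣ l.length := by
          have : ((l.length % j : Nat) : Int) = 0 := by simpa using h1
          exact Nat.dvd_of_mod_eq_zero (by exact_mod_cast this)
        have hgj : pvGood l j := ⟨hj, hdvdj, (pv_rot_iff_rep l j hj hdvdj).mpr h2⟩
        have hjd0 : d0 = j := by
          have h4 := hmin j hgj
          have h5 : ¬ d0 < j := fun hlt => hno d0 hgood.1 hlt hgood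
          omega
        rw [hjd0]
      · -- divisor but no repetition
        have hdvdj : j ∣ l.length := by
          have : ((l.length % j : Nat) : Int) = 0 := by simpa using h1
          exact Nat.dvd_of_mod_eq_zero (by exact_mod_cast this)
        refine hstep ?_
        intro hbadgood
        exact h2 ((pv_rot_iff_rep l j hj hdvdj).mp hbadgood.2.2)
    · rw [dif_neg hcase]
      rw [pv_d0_eq_N l d0 hN hgood j (by push_cast at hcase; omega) hno, Nat.div_self (by omega)]
      simp

lemma pv_divLoop_mono (n : Int) : ∀ (fuel : Nat) (d : Int) (acc : List Int),
    (n + 1 - d).toNat ≤ fuel → ∀ x ∈ acc, x ∈ divLoop n d acc := by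
  intro fuel
  induction fuel with
  | zero =>
    intro d acc hf x hx
    rw [divLoop]
    split
    · rename_i hg
      have : d ≤ n := by nlinarith [sq_nonneg d]
      omega
    · exact hx
  | succ f ih =>
    intro d acc hf x hx
    rw [divLoop]
    split
    · rename_i hg
      have hdn : d ≤ n := by nlinarith [sq_nonneg d]
      apply ih (d + 1) _ (by omega)
      split
      · rw [PySem.Set.mem_add, PySem.Set.mem_add]
        exact Or.inl (Or.inl hx)
      · exact hx
    · exact hx

lemma pv_divLoop_sound (n : Int) (hn : 1 ≤ n) : ∀ (fuel : Nat) (d : Int) (acc : List Int),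
    (n + 1 - d).toNat ≤ fuel → 1 ≤ d → (∀ x ∈ acc, 1 ≤ x ∧ x ∣ n) →
    ∀ x ∈ divLoop n d acc, 1 ≤ x ∧ x ∣ n := by
  intro fuel
  induction fuel with
  | zero =>
    intro d acc hf hd hacc x hx
    rw [divLoop] at hx
    split at hx
    · rename_i hg
      have : d ≤ n := by nlinarith [sq_nonneg d]
      omega
    · exact hacc x hx
  | succ f ih =>
    intro d acc hf hd hacc x hx
    rw [divLoop] at hx
    split at hx
    · rename_i hg
      have hdn : d ≤ n := by nlinarith
      refine ih (d + 1) _ (by omega) (by omega) ?_ x hx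
      split
      · rename_i hmod
        have hdvd : d ∣ n := (PySem.Int.mod_eq_zero_iff_dvd n d).mp hmod
        intro y hy
        rw [PySem.Set.mem_add, PySem.Set.mem_add] at hy
        rcases hy with (hy | rfl) | rfl
        · exact hacc y hy
        · exact ⟨hd, hdvd⟩
        · rw [PySem.Int.floordiv_eq_ediv_of_pos (by omega)]
          constructor
          · rw [Int.le_ediv_iff_mul_le (by omega)]
            nlinarith
          · exact ⟨d, (Int.ediv_mul_cancel hdvd).symm⟩
      · exact hacc
    · exact hacc x hx

lemma pv_divLoop_complete (n : Int) (hn : 1 ≤ n) (x : Int) (hx : 1 ≤ x) (hdvd : x ∣ n) :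
    ∀ (fuel : Nat) (d : Int) (acc : List Int), (n + 1 - d).toNat ≤ fuel →
      1 ≤ d → d ≤ min x (n / x) → x ∈ divLoop n d acc := by
  have hxn : x ≤ n := Int.le_of_dvd (by omega) hdvd
  have hmul : x * (n / x) = n := Int.mul_ediv_cancel' hdvd
  have hqpos : 1 ≤ n / x := by rw [Int.le_ediv_iff_mul_le (by omega)]; omega
  have hqdvd : n / x ∣ n := ⟨x, by rw [mul_comm (n / x) x]; exact hmul.symm⟩
  intro fuel
  induction fuel with
  | zero =>
    intro d acc hf hd he
    exfalso
    have h1 : d ≤ x := le_trans he (min_le_left _ _)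
    omega
  | succ f ih =>
    intro d acc hf hd he
    have h1 : d ≤ x := le_trans he (min_le_left _ _)
    have h2 : d ≤ n / x := le_trans he (min_le_right _ _)
    have hg : d * d ≤ n := by nlinarith
    rw [divLoop]
    rw [dif_pos hg]
    rcases eq_or_lt_of_le he with heq | hlt
    · -- this step inserts x into the set
      have hddvd : d ∣ n := by
        rcases le_total x (n / x) with hc | hc
        · rw [min_eq_left hc] at heq; rw [heq]; exact hdvd
        · rw [min_eq_right hc] at heq; rw [heq]; exact hqdvd
      rw [if_pos ((PySem.Int.mod_eq_zero_iff_dvd n d).mpr hddvd)]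
      apply pv_divLoop_mono n f (d + 1) _ (by omega)
      rw [PySem.Int.floordiv_eq_ediv_of_pos (by omega), PySem.Set.mem_add, PySem.Set.mem_add]
      rcases le_total x (n / x) with hc | hc
      · rw [min_eq_left hc] at heq
        exact Or.inl (Or.inr heq.symm)
      · rw [min_eq_right hc] at heq
        have hxd : x * d = n := by rw [heq]; exact hmul
        have hnd : n / d = x := by
          rw [← hxd, mul_comm, Int.mul_ediv_cancel_left _ (by omega : d ≠ 0)]
        exact Or.inr hnd.symm
    · exact ih (d + 1) _ (by omega) (by omega) (by omega)

lemma pv_divLoop_nodup (n : Int) : ∀ (fuel : Nat) (d : Int) (acc : List Int),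
    (n + 1 - d).toNat ≤ fuel → acc.Nodup → (divLoop n d acc).Nodup := by
  intro fuel
  induction fuel with
  | zero =>
    intro d acc hf hacc
    rw [divLoop]
    split
    · rename_i hg
      have : d ≤ n := by nlinarith [sq_nonneg d]
      omega
    · exact hacc
  | succ f ih =>
    intro d acc hf hacc
    rw [divLoop]
    split
    · rename_i hg
      have hdn : d ≤ n := by nlinarith
      apply ih (d + 1) _ (by omega)
      split
      · exact PySem.Set.nodup_add _ _ (PySem.Set.nodup_add _ _ hacc)
      · exact hacc
    · exact hacc

-- rotation condition of the port at a natural index, in drop/take form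
lemma pv_slice_bridge (l : List Char) (k : Nat) :
    (PySem.List.slice l (some (k : Int)) none ++ PySem.List.slice l none (some (k : Int)))
      = l.drop k ++ l.take k := by
  rw [PySem.List.slice_from_natCast, PySem.List.slice_to_natCast]

-- the scan over a strictly increasing list of divisors stops exactly at d0
lemma pv_scanB (l : List Char) (d0 : Nat)
    (hrot : l.drop d0 ++ l.take d0 = l) :
    ∀ xs : List Int, xs.Pairwise (· < ·) →
      ((d0 : Int) ∈ xs) →
      (∀ x ∈ xs, (PySem.List.slice l (some x) none ++ PySem.List.slice l none (some x) = l) → (d0 : Int) ≤ x) →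
      scanB l (l.length : Int) xs = ((l.length / d0 : Nat) : Int) := by
  intro xs
  induction xs with
  | nil => intro _ hmem _; simp at hmem
  | cons h t ih =>
    intro hp hmem hminm
    rw [scanB]
    split_ifs with hc
    · have hd0h : (d0 : Int) ≤ h := hminm h (List.mem_cons_self) hc
      have hhd0 : h = (d0 : Int) := by
        rcases List.mem_cons.mp hmem with heq | hmemt
        · exact heq.symm
        · exfalso
          have := (List.pairwise_cons.mp hp).1 _ hmemt
          omega
      rw [hhd0]
      exact_mod_cast PySem.Int.floordiv_natCast l.length d0
    · have hne : h ≠ (d0 : Int) := by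
        rintro rfl
        exact hc (by rw [pv_slice_bridge]; exact hrot)
      have hmemt : (d0 : Int) ∈ t := by
        rcases List.mem_cons.mp hmem with heq | hmemt
        · exact absurd heq.symm hne
        · exact hmemt
      exact ih (List.pairwise_cons.mp hp).2 hmemt
        (fun x hx hcx => hminm x (List.mem_cons_of_mem _ hx) hcx)

-- ===== VERDICT (by name: the statement is the Claim_ definition above) =====
theorem solution_spec : Claim_equal_solution := by
  unfold Claim_equal_solution
  intro s _
  unfold Spec_solution solution solution_alt
  dsimp only
  rcases Nat.eq_zero_or_pos s.toList.length with h0 | hpos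
  · -- empty string: both sides compute to 1
    have hl : s.toList = [] := List.eq_nil_of_length_eq_zero h0
    rw [hl, solA_loop, divLoop]
    rw [dif_neg (by decide), dif_neg (by decide)]
    rfl
  · set l := s.toList with hldef
    haveI : DecidablePred (pvGood l) := fun k => by unfold pvGood; infer_instance
    have hex : ∃ k, pvGood l k :=
      ⟨l.length, hpos, dvd_refl _, by rw [List.drop_length, List.take_length]; rfl⟩
    have hgood : pvGood l (Nat.find hex) := Nat.find_spec hex
    have hmin : ∀ m, pvGood l m → Nat.find hex ≤ m := fun m hm => Nat.find_min' hex hm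
    set d0 := Nat.find hex with hd0def
    -- A's side
    have hA : solA_loop l ((1 : Nat) : Int) = ((l.length / d0 : Nat) : Int) :=
      pv_loopA l d0 hpos hgood hmin (l.length / 2 + 1) 1 (by omega) le_rfl
        (by intro m hm1 hmlt; omega)
    -- B's side
    have hn1 : (1 : Int) ≤ (l.length : Int) := by exact_mod_cast hpos
    have hfuel : (((l.length : Int)) + 1 - 1).toNat ≤ l.length + 1 := by omega
    have hsound : ∀ x ∈ divLoop (l.length : Int) 1 PySem.Set.empty, 1 ≤ x ∧ x ∣ (l.length : Int) :=
      pv_divLoop_sound (l.length : Int) hn1 (l.length + 1) 1 PySem.Set.empty hfuel le_rfl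
        (by intro x hx; simp [PySem.Set.empty] at hx)
    have hnd : (divLoop (l.length : Int) 1 PySem.Set.empty).Nodup :=
      pv_divLoop_nodup (l.length : Int) (l.length + 1) 1 PySem.Set.empty hfuel List.nodup_nil
    have hperm := PySem.List.sorted_perm (divLoop (l.length : Int) 1 PySem.Set.empty)
      (fun (x : Int) => x) false
    have hxsnd : (PySem.List.sorted (divLoop (l.length : Int) 1 PySem.Set.empty)
        (fun (x : Int) => x) false).Nodup := hperm.nodup_iff.mpr hnd
    have hple := PySem.List.sorted_pairwise (divLoop (l.length : Int) 1 PySem.Set.empty)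
      (fun (x : Int) => x)
    have hplt : (PySem.List.sorted (divLoop (l.length : Int) 1 PySem.Set.empty)
        (fun (x : Int) => x) false).Pairwise (· < ·) :=
      (hple.and hxsnd).imp (fun hab => lt_of_le_of_ne hab.1 hab.2)
    -- d0 is in the scanned list
    have hd0pos : (1 : Int) ≤ (d0 : Int) := by exact_mod_cast hgood.1
    have hd0dvd : (d0 : Int) ∣ (l.length : Int) := Int.natCast_dvd_natCast.mpr hgood.2.1
    have hd0leN : (d0 : Int) ≤ (l.length : Int) := by
      exact_mod_cast Nat.le_of_dvd hpos hgood.2.1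
    have hd0mem : (d0 : Int) ∈ divLoop (l.length : Int) 1 PySem.Set.empty :=
      pv_divLoop_complete (l.length : Int) hn1 (d0 : Int) hd0pos hd0dvd
        (l.length + 1) 1 PySem.Set.empty hfuel le_rfl
        (le_min hd0pos (by rw [Int.le_ediv_iff_mul_le (by omega)]; omega))
    have hd0mem' : (d0 : Int) ∈ PySem.List.sorted (divLoop (l.length : Int) 1 PySem.Set.empty)
        (fun (x : Int) => x) false := by
      rw [PySem.List.mem_sorted]; exact hd0mem
    have hminm : ∀ x ∈ PySem.List.sorted (divLoop (l.length : Int) 1 PySem.Set.empty)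
        (fun (x : Int) => x) false,
        (PySem.List.slice l (some x) none ++ PySem.List.slice l none (some x) = l) →
        (d0 : Int) ≤ x := by
      intro x hx hcx
      rw [PySem.List.mem_sorted] at hx
      obtain ⟨hx1, hxdvd⟩ := hsound x hx
      have hxk : x = ((x.toNat : Nat) : Int) := by omega
      rw [hxk, pv_slice_bridge] at hcx
      have hgk : pvGood l x.toNat :=
        ⟨by omega, Int.natCast_dvd_natCast.mp (by rw [← hxk]; exact hxdvd), hcx⟩
      have := hmin _ hgk
      omega
    have hB := pv_scanB l d0 hgood.2.2 _ hplt hd0mem' hminm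
    rw [show ((1 : Nat) : Int) = (1 : Int) from by norm_num] at hA
    rw [hA, hB]
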